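-- pv_equiv track=rewrite | github.com/WatchThisFirewall/WTF.v1 | app/Scripts/utils_v2.py | Color_Line
-- ===== SOURCE A (Python) =====
-- def Color_Line(IN_Line):
--     Red_Words    = ['no', 'NEW','|','i','ip','any','any4','clear','tcp','udp','ip','icmp','deny','(hitcnt=0)','inactive','shutdown','address','standby','route','ssh','circular-buffer','[Capturing','0','password','+','-']
--     Blu_Words    = ['interface','access-group','access-list','host','network','nat','route','show','run','unidirectional','username']
--     Green_Words  = ['in','log','description','logging','permit']
--     Purple_Words = ['configure', 'extended', 'service','protocol','capture']
--     Brown_Words  = ['network-object','source','dynamic','static','destination','object-group','object','port-object','policy-map','match','to','eq','line','range']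
--     Red_Color    = '#ba1e28'
--     Blu_Color    = '#1e25ba'
--     Green_Color  = '#1cb836'
--     Purple_Color = '#8f1489'
--     Brown_Color  = '#995c00'
--
--     OUT_Line = ''
--     for t_word in IN_Line.split():
--         if t_word in Blu_Words:
--             OUT_Line = OUT_Line + '<font color="%s"> %s </font>' %(Blu_Color, t_word)
--         elif t_word in Red_Words:
--             OUT_Line = OUT_Line + '<font color="%s"> %s </font>' %(Red_Color, t_word)
--         elif t_word in Green_Words:
--             OUT_Line = OUT_Line + '<font color="%s"> %s </font>' %(Green_Color, t_word)
--         elif t_word in Purple_Words: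
--             OUT_Line = OUT_Line + '<font color="%s"> %s </font>' %(Purple_Color, t_word)
--         elif t_word in Brown_Words:
--             OUT_Line = OUT_Line + '<font color="%s"> %s </font>' %(Brown_Color, t_word)
--         else:
--             OUT_Line = OUT_Line + '%s ' %t_word
--     return OUT_Line
-- ===== SOURCE B (Python) =====
-- def Color_Line(IN_Line):
--     # one word->color table, filled in reverse priority so higher-priority colors overwrite
--     color_of = {}
--     for words, color in (
--         (['network-object','source','dynamic','static','destination','object-group','object','port-object','policy-map','match','to','eq','line','range'], '#995c00'),
--         (['configure', 'extended', 'service','protocol','capture'], '#8f1489'),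
--         (['in','log','description','logging','permit'], '#1cb836'),
--         (['no', 'NEW','|','i','ip','any','any4','clear','tcp','udp','ip','icmp','deny','(hitcnt=0)','inactive','shutdown','address','standby','route','ssh','circular-buffer','[Capturing','0','password','+','-'], '#ba1e28'),
--         (['interface','access-group','access-list','host','network','nat','route','show','run','unidirectional','username'], '#1e25ba'),
--     ):
--         for w in words:
--             color_of[w] = color
--     pieces = []
--     for w in IN_Line.split():
--         c = color_of.get(w)
--         pieces.append('<font color="%s"> %s </font>' % (c, w) if c is not None else '%s ' % w)
--     return ''.join(pieces)
-- ===== Notes on version B (the rewrite author's own statement) =====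
-- stated objective: idiomatic
-- what changed: Replaces the five ordered per-word membership scans and elif chain by a word-to-color dict built once in reverse-priority order (later inserts overwrite, mirroring the elif precedence) followed by a single lookup pass whose rendered pieces are joined at the end.
import Mathlib
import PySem

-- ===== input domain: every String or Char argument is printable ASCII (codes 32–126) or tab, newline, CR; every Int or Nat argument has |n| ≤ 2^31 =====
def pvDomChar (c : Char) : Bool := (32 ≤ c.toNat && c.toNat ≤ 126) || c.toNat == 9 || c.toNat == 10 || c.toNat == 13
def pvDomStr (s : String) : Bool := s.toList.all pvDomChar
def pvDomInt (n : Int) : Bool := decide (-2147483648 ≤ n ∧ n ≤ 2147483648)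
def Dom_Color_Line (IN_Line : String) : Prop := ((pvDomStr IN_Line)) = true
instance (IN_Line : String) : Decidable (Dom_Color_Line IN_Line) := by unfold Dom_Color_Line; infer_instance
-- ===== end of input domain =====

-- B replaces the five ordered membership scans per word by one word→color dict built once
-- (filled in reverse-priority order so overwrites reproduce the elif precedence) and a single
-- lookup pass whose pieces are joined at the end (objective: idiomatic).

-- shared word/color constants (the same literal data both Pythons carry)
def pvRedWords : List String := ["no", "NEW", "|", "i", "ip", "any", "any4", "clear", "tcp", "udp", "ip", "icmp", "deny", "(hitcnt=0)", "inactive", "shutdown", "address", "standby", "route", "ssh", "circular-buffer", "[Capturing", "0", "password", "+", "-"]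
def pvBluWords : List String := ["interface", "access-group", "access-list", "host", "network", "nat", "route", "show", "run", "unidirectional", "username"]
def pvGreenWords : List String := ["in", "log", "description", "logging", "permit"]
def pvPurpleWords : List String := ["configure", "extended", "service", "protocol", "capture"]
def pvBrownWords : List String := ["network-object", "source", "dynamic", "static", "destination", "object-group", "object", "port-object", "policy-map", "match", "to", "eq", "line", "range"]
def pvRedColor : String := "#ba1e28"
def pvBluColor : String := "#1e25ba"
def pvGreenColor : String := "#1cb836"
def pvPurpleColor : String := "#8f1489"
def pvBrownColor : String := "#995c00"

-- ===== PORT A =====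
def Color_Line (IN_Line : String) : String :=
  (PySem.Str.split₀ IN_Line).foldl (fun OUT_Line t_word =>
    if t_word ∈ pvBluWords then
      OUT_Line ++ ("<font color=\"" ++ pvBluColor ++ "\"> " ++ t_word ++ " </font>")
    else if t_word ∈ pvRedWords then
      OUT_Line ++ ("<font color=\"" ++ pvRedColor ++ "\"> " ++ t_word ++ " </font>")
    else if t_word ∈ pvGreenWords then
      OUT_Line ++ ("<font color=\"" ++ pvGreenColor ++ "\"> " ++ t_word ++ " </font>")
    else if t_word ∈ pvPurpleWords then
      OUT_Line ++ ("<font color=\"" ++ pvPurpleColor ++ "\"> " ++ t_word ++ " </font>")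
    else if t_word ∈ pvBrownWords then
      OUT_Line ++ ("<font color=\"" ++ pvBrownColor ++ "\"> " ++ t_word ++ " </font>")
    else
      OUT_Line ++ (t_word ++ " ")) ""

-- ===== PORT B =====
-- the word→color table, filled in reverse-priority order (later inserts overwrite)
def pvColorTable : PySem.Dict String String :=
  ([(pvBrownWords, pvBrownColor), (pvPurpleWords, pvPurpleColor),
    (pvGreenWords, pvGreenColor), (pvRedWords, pvRedColor),
    (pvBluWords, pvBluColor)] : List (List String × String)).foldl
    (fun d pr => pr.1.foldl (fun d w => d.insert w pr.2) d) PySem.Dict.empty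

def pvRender (color_of : PySem.Dict String String) (w : String) : String :=
  match color_of.get? w with
  | some c => "<font color=\"" ++ c ++ "\"> " ++ w ++ " </font>"
  | none => w ++ " "

def Color_Line_alt (IN_Line : String) : String :=
  PySem.Str.join "" ((PySem.Str.split₀ IN_Line).map (pvRender pvColorTable))

-- ===== PRECONDITION & SPEC =====
def Spec_Color_Line (IN_Line : String) (out : String) : Prop := out = Color_Line_alt IN_Line
instance (IN_Line : String) (out : String) : Decidable (Spec_Color_Line IN_Line out) := by unfold Spec_Color_Line; infer_instance

-- ===== CLAIM (what is proved, stated in full; the proofs are below) =====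
def Claim_equal_Color_Line : Prop := ∀ (IN_Line : String), Dom_Color_Line IN_Line → Spec_Color_Line IN_Line (Color_Line IN_Line)

-- ===== LEMMAS AND PROOFS =====

-- A's elif precedence, as a selection function
def pvPrio (w : String) : Option String :=
  if w ∈ pvBluWords then some pvBluColor
  else if w ∈ pvRedWords then some pvRedColor
  else if w ∈ pvGreenWords then some pvGreenColor
  else if w ∈ pvPurpleWords then some pvPurpleColor
  else if w ∈ pvBrownWords then some pvBrownColor
  else none

set_option maxRecDepth 40000 in
lemma pvTable_keys_sub : ∀ x ∈ pvColorTable.keys,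
    x ∈ pvBluWords ∨ x ∈ pvRedWords ∨ x ∈ pvGreenWords ∨ x ∈ pvPurpleWords ∨ x ∈ pvBrownWords := by
  decide

set_option maxRecDepth 40000 in
lemma pvTable_get (w : String) : pvColorTable.get? w = pvPrio w := by
  by_cases h1 : w ∈ pvBluWords
  · fin_cases h1 <;> decide
  · by_cases h2 : w ∈ pvRedWords
    · fin_cases h2 <;> decide
    · by_cases h3 : w ∈ pvGreenWords
      · fin_cases h3 <;> decide
      · by_cases h4 : w ∈ pvPurpleWords
        · fin_cases h4 <;> decide
        · by_cases h5 : w ∈ pvBrownWords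
          · fin_cases h5 <;> decide
          · have hnk : w ∉ pvColorTable.keys := by
              intro hk
              rcases pvTable_keys_sub w hk with h | h | h | h | h <;>
                first
                | exact h1 h | exact h2 h | exact h3 h | exact h4 h | exact h5 h
            rw [(PySem.Dict.get?_eq_none_iff_not_mem_keys pvColorTable w).mpr hnk, pvPrio]
            simp [h1, h2, h3, h4, h5]

lemma pvRender_eq (w : String) :
    (if w ∈ pvBluWords then "<font color=\"" ++ pvBluColor ++ "\"> " ++ w ++ " </font>"
     else if w ∈ pvRedWords then "<font color=\"" ++ pvRedColor ++ "\"> " ++ w ++ " </font>"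
     else if w ∈ pvGreenWords then "<font color=\"" ++ pvGreenColor ++ "\"> " ++ w ++ " </font>"
     else if w ∈ pvPurpleWords then "<font color=\"" ++ pvPurpleColor ++ "\"> " ++ w ++ " </font>"
     else if w ∈ pvBrownWords then "<font color=\"" ++ pvBrownColor ++ "\"> " ++ w ++ " </font>"
     else w ++ " ") = pvRender pvColorTable w := by
  unfold pvRender
  rw [pvTable_get, pvPrio]
  split_ifs <;> rfl

lemma pvJoin_empty_cons (x : String) (xs : List String) :
    PySem.Str.join "" (x :: xs) = x ++ PySem.Str.join "" xs := by
  have h : ∀ (c : List Char) (cs : List (List Char)),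
      ([] : List Char).intercalate (c :: cs) = c ++ ([] : List Char).intercalate cs := by
    intro c cs
    induction cs with
    | nil => simp [List.intercalate]
    | cons y ys ih => simp_all [List.intercalate, List.intersperse]
  simp [PySem.Str.join, PySem.Chars.join, h, String.ofList_append]

lemma pvFoldl_append_join (f : String → String) (ws : List String) (s : String) :
    ws.foldl (fun a w => a ++ f w) s = s ++ PySem.Str.join "" (ws.map f) := by
  induction ws generalizing s with
  | nil => simp [PySem.Str.join]
  | cons w rest ih =>
      simp only [List.foldl_cons, List.map_cons, ih, pvJoin_empty_cons, String.append_assoc]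

-- ===== VERDICT (by name: the statement is the Claim_ definition above) =====
theorem Color_Line_spec : Claim_equal_Color_Line := by
  intro IN_Line _
  show Color_Line IN_Line = Color_Line_alt IN_Line
  unfold Color_Line Color_Line_alt
  have hbody : ∀ (a w : String),
      (if w ∈ pvBluWords then a ++ ("<font color=\"" ++ pvBluColor ++ "\"> " ++ w ++ " </font>")
       else if w ∈ pvRedWords then a ++ ("<font color=\"" ++ pvRedColor ++ "\"> " ++ w ++ " </font>")
       else if w ∈ pvGreenWords then a ++ ("<font color=\"" ++ pvGreenColor ++ "\"> " ++ w ++ " </font>")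
       else if w ∈ pvPurpleWords then a ++ ("<font color=\"" ++ pvPurpleColor ++ "\"> " ++ w ++ " </font>")
       else if w ∈ pvBrownWords then a ++ ("<font color=\"" ++ pvBrownColor ++ "\"> " ++ w ++ " </font>")
       else a ++ (w ++ " ")) = a ++ pvRender pvColorTable w := by
    intro a w
    rw [← pvRender_eq w]
    split_ifs <;> rfl
  calc (PySem.Str.split₀ IN_Line).foldl _ ""
      = (PySem.Str.split₀ IN_Line).foldl (fun a w => a ++ pvRender pvColorTable w) "" := by
        exact PySem.List.foldl_congr_mem _ _ _ _ (fun a w _ => hbody a w)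
    _ = PySem.Str.join "" ((PySem.Str.split₀ IN_Line).map (pvRender pvColorTable)) := by
        rw [pvFoldl_append_join, String.empty_append]
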